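-- pv_equiv track=rewrite | github.com/lmboat/ms_cpdaa_analysis | processing_scripts/240405_ms_process.py | get_assigned_mods
-- ===== SOURCE A (Python) =====
-- def get_assigned_mods(peptide, symbol1, symbol2, numbering):
--   inside_data = []
--   cumulative_offset = 0  # Initialize cumulative index offset
--
--   i = 0  # Initialize index for character traversal
--
--   while i < len(peptide):
--       if peptide[i] == symbol1:
--           start_index = i
--           i += 1  # Move to the character after '['
--           while i < len(peptide) and peptide[i] != symbol2:
--               i += 1  # Skip characters within '[' and ']'
--           if i < len(peptide):
--               end_index = i
--               if numbering:
--                   st = str(start_index - cumulative_offset) + '_' + peptide[start_index-1:end_index + 1]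
--               else:
--                   st = peptide[start_index-1:end_index + 1]
--
--               inside_data.append(st)
--               cumulative_offset += end_index - start_index + 1  # Update cumulative offset
--
--       i += 1  # Move to the next character
--
--   return inside_data
-- ===== SOURCE B (Python) =====
-- import re
--
-- def get_assigned_mods(peptide, symbol1, symbol2, numbering):
--     if len(symbol1) != 1 or len(symbol2) != 1:
--         return []  # delimiters are single characters; otherwise no region can open and close
--     pattern = re.escape(symbol1) + '[^' + re.escape(symbol2) + ']*' + re.escape(symbol2)
--     result = []
--     cumulative_offset = 0
--     for m in re.finditer(pattern, peptide):
--         start, end = m.start(), m.end() - 1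
--         piece = peptide[start - 1:end + 1]
--         if numbering:
--             piece = str(start - cumulative_offset) + '_' + piece
--         result.append(piece)
--         cumulative_offset += end - start + 1
--     return result
-- ===== Notes on version B (the rewrite author's own statement) =====
-- stated objective: idiomatic
-- what changed: Replaces A's hand-written per-character while-loop (with a nested closing-delimiter scan) by a single re.finditer pass over the regex sym1[^sym2]*sym2, followed by one loop over the match objects that maintains the cumulative offset; non-single-character delimiters are handled by an explicit early return [] since no region can then open and close.
import Mathlib
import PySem

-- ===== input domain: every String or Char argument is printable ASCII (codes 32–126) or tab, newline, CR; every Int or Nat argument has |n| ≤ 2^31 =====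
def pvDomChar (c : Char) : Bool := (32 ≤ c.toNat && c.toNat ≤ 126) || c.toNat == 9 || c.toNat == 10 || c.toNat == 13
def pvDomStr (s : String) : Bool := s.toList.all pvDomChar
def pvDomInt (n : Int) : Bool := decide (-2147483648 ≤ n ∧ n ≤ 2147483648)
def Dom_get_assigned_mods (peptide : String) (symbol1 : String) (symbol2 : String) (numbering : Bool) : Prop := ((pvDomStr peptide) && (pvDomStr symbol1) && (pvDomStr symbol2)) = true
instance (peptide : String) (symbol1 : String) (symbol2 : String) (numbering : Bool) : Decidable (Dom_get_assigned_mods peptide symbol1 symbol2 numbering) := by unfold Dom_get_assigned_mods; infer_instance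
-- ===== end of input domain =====

-- B replaces A's per-character while-loop by a finditer-style pass producing all (start,end)
-- match positions first, then a second pass rendering them with a cumulative offset (objective: idiomatic).

-- ===== PORT A =====
-- Python's `peptide[i] == symbol1` compares the 1-char string peptide[i] with the string symbol1 (exact).
def pvCharEqStr (c : Char) (sym : String) : Bool := sym.toList == [c]

-- inner `while i < len(peptide) and peptide[i] != symbol2: i += 1` (returns the final i)
def pvAScan (s : List Char) (symbol2 : String) (i : Nat) : Nat :=
  if h : i < s.length then
    if pvCharEqStr s[i] symbol2 then i
    else pvAScan s symbol2 (i + 1)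
  else i
termination_by s.length - i

-- termination fact the outer loop's `decreasing_by` cites
theorem pvAScan_ge (s : List Char) (symbol2 : String) (i : Nat) : i ≤ pvAScan s symbol2 i := by
  fun_induction pvAScan s symbol2 i with
  | case1 => exact le_refl _
  | case2 _ _ _ ih => omega
  | case3 => exact le_refl _

-- outer while-loop of A, state = (i, cumulative_offset, inside_data); start_index = i and
-- end_index = pvAScan s symbol2 (i+1) are written inline; the slice is
-- peptide[start_index-1:end_index+1] with Python slice semantics (start-1 may be -1)
def pvALoop (s : List Char) (symbol1 symbol2 : String) (numbering : Bool)
    (i : Nat) (off : Int) (acc : List String) : List String :=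
  if h : i < s.length then
    if pvCharEqStr s[i] symbol1 then
      if hj : pvAScan s symbol2 (i + 1) < s.length then
        pvALoop s symbol1 symbol2 numbering (pvAScan s symbol2 (i + 1) + 1)
          (off + ((pvAScan s symbol2 (i + 1) : Int) - (i : Int) + 1))
          (acc ++ [(if numbering then
              PySem.Int.toStr ((i : Int) - off) ++ "_" ++
                String.ofList (PySem.List.slice s (some ((i : Int) - 1)) (some ((pvAScan s symbol2 (i + 1) : Int) + 1)))
            else
              String.ofList (PySem.List.slice s (some ((i : Int) - 1)) (some ((pvAScan s symbol2 (i + 1) : Int) + 1))))])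
      else acc
    else pvALoop s symbol1 symbol2 numbering (i + 1) off acc
  else acc
termination_by s.length - i
decreasing_by
  · have := pvAScan_ge s symbol2 (i + 1); omega
  · omega

def get_assigned_mods (peptide : String) (symbol1 : String) (symbol2 : String) (numbering : Bool) : List String :=
  pvALoop peptide.toList symbol1 symbol2 numbering 0 0 []

-- ===== PORT B =====
-- hand port of re.finditer(esc(sym1)+'[^'+esc(sym2)+']*'+esc(sym2), peptide): the list of
-- (m.start(), m.end()-1) of the non-overlapping leftmost matches of  c1 [^c2]* c2
def pvBFind (s : List Char) (c1 c2 : Char) (i : Nat) : List (Nat × Nat) :=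
  if h : i < s.length then
    if s[i] == c1 then
      match (s.drop (i + 1)).findIdx? (· == c2) with
      | some k => (i, i + 1 + k) :: pvBFind s c1 c2 (i + 1 + k + 1)
      | none => []
    else pvBFind s c1 c2 (i + 1)
  else []
termination_by s.length - i
decreasing_by all_goals omega

-- B's `for m in re.finditer(...)` loop, carrying cumulative_offset
def pvBRender (s : List Char) (numbering : Bool) : List (Nat × Nat) → Int → List String
  | [], _ => []
  | (st, en) :: rest, off =>
    (if numbering then
        PySem.Int.toStr ((st : Int) - off) ++ "_" ++
          String.ofList (PySem.List.slice s (some ((st : Int) - 1)) (some ((en : Int) + 1)))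
      else
        String.ofList (PySem.List.slice s (some ((st : Int) - 1)) (some ((en : Int) + 1))))
      :: pvBRender s numbering rest (off + ((en : Int) - (st : Int) + 1))

def get_assigned_mods_alt (peptide : String) (symbol1 : String) (symbol2 : String) (numbering : Bool) : List String :=
  match symbol1.toList, symbol2.toList with
  | [c1], [c2] => pvBRender peptide.toList numbering (pvBFind peptide.toList c1 c2 0) 0
  | _, _ => []  -- no single-character delimiters: no region can open and close

-- ===== PRECONDITION & SPEC =====
def Spec_get_assigned_mods (peptide : String) (symbol1 : String) (symbol2 : String) (numbering : Bool) (out : List String) : Prop := out = get_assigned_mods_alt peptide symbol1 symbol2 numbering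
instance (peptide : String) (symbol1 : String) (symbol2 : String) (numbering : Bool) (out : List String) : Decidable (Spec_get_assigned_mods peptide symbol1 symbol2 numbering out) := by unfold Spec_get_assigned_mods; infer_instance

-- ===== CLAIM (what is proved, stated in full; the proofs are below) =====
def Claim_equal_get_assigned_mods : Prop := ∀ (peptide : String) (symbol1 : String) (symbol2 : String) (numbering : Bool), Dom_get_assigned_mods peptide symbol1 symbol2 numbering → Spec_get_assigned_mods peptide symbol1 symbol2 numbering (get_assigned_mods peptide symbol1 symbol2 numbering)

-- ===== LEMMAS AND PROOFS =====

-- symbol1 is not a one-character string: A's opening test never fires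
theorem pvALoop_no_sym1 (s : List Char) (symbol1 symbol2 : String) (n : Bool)
    (h1 : ∀ c : Char, symbol1.toList ≠ [c]) :
    ∀ i off acc, pvALoop s symbol1 symbol2 n i off acc = acc := by
  intro i off acc
  fun_induction pvALoop s symbol1 symbol2 n i off acc <;> simp_all [pvCharEqStr]

-- symbol2 is not a one-character string: A's inner scan runs to the end of the string
theorem pvAScan_no_sym2 (s : List Char) (symbol2 : String)
    (h2 : ∀ c : Char, symbol2.toList ≠ [c]) :
    ∀ i, pvAScan s symbol2 i = max i s.length := by
  intro i
  fun_induction pvAScan s symbol2 i <;> simp_all [pvCharEqStr] <;> omega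

theorem pvALoop_no_sym2 (s : List Char) (symbol1 symbol2 : String) (n : Bool)
    (h2 : ∀ c : Char, symbol2.toList ≠ [c]) :
    ∀ i off acc, pvALoop s symbol1 symbol2 n i off acc = acc := by
  intro i off acc
  fun_induction pvALoop s symbol1 symbol2 n i off acc <;>
    first
      | rfl
      | assumption
      | (simp only [pvAScan_no_sym2 s symbol2 h2] at *; omega)

-- A's inner scan = first index ≥ i whose character is c2 (s.length when there is none)
theorem pvAScan_eq_findIdx (s : List Char) (symbol2 : String) (c2 : Char)
    (h2 : symbol2.toList = [c2]) :
    ∀ i, pvAScan s symbol2 i = i + (s.drop i).findIdx (· == c2) := by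
  intro i
  fun_induction pvAScan s symbol2 i with
  | case1 i h heq =>
    simp only [pvCharEqStr, h2] at heq
    have hc : c2 = s[i] := by simpa using heq
    rw [List.drop_eq_getElem_cons h, List.findIdx_cons]
    simp [← hc]
  | case2 i h heq ih =>
    simp only [pvCharEqStr, h2] at heq
    have hc : ¬ c2 = s[i] := by simpa using heq
    have hb : (s[i] == c2) = false := by
      simp only [beq_eq_false_iff_ne, ne_eq]
      exact fun hh => hc hh.symm
    rw [List.drop_eq_getElem_cons h, List.findIdx_cons, hb]
    simp only [cond_false]
    omega
  | case3 i h =>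
    rw [List.drop_eq_nil_of_le (by omega)]
    simp

-- main invariant: A's loop from index i = acc ++ B's rendering of the matches from i
theorem pvALoop_eq_render (s : List Char) (symbol1 symbol2 : String) (n : Bool) (c1 c2 : Char)
    (h1 : symbol1.toList = [c1]) (h2 : symbol2.toList = [c2]) :
    ∀ i off acc, pvALoop s symbol1 symbol2 n i off acc
      = acc ++ pvBRender s n (pvBFind s c1 c2 i) off := by
  intro i off acc
  fun_induction pvALoop s symbol1 symbol2 n i off acc with
  | case1 i off acc h heq hj ih =>
    simp only [pvCharEqStr, h1] at heq
    have hc : c1 = s[i] := by simpa using heq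
    have hscan := pvAScan_eq_findIdx s symbol2 c2 h2 (i + 1)
    have hklt : (s.drop (i + 1)).findIdx (· == c2) < (s.drop (i + 1)).length := by
      rw [List.length_drop]; omega
    have hfind : (s.drop (i + 1)).findIdx? (· == c2)
        = some ((s.drop (i + 1)).findIdx (· == c2)) :=
      List.findIdx?_eq_some_iff_findIdx_eq.mpr ⟨hklt, rfl⟩
    have hb : (s[i] == c1) = true := by rw [← hc]; exact beq_self_eq_true c1
    conv_rhs => rw [pvBFind]
    rw [dif_pos h]
    simp only [hb]
    rw [if_pos trivial]
    simp only [hfind]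
    rw [pvBRender]
    rw [hscan] at ih ⊢
    simp only [dite_eq_ite] at ih
    rw [ih]
    simp
  | case2 i off acc h heq hj =>
    have hc : c1 = s[i] := by simpa using (by simp only [pvCharEqStr, h1] at heq; exact heq : ([c1] == [s[i]]) = true)
    have hscan := pvAScan_eq_findIdx s symbol2 c2 h2 (i + 1)
    have hle := List.findIdx_le_length (p := (· == c2)) (xs := s.drop (i + 1))
    have hfind : (s.drop (i + 1)).findIdx? (· == c2) = none :=
      List.findIdx?_eq_none_iff_findIdx_eq.mpr (by rw [List.length_drop] at *; omega)
    have hb : (s[i] == c1) = true := by rw [← hc]; exact beq_self_eq_true c1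
    conv_rhs => rw [pvBFind]
    rw [dif_pos h]
    simp only [hb]
    rw [if_pos trivial]
    simp only [hfind]
    rw [pvBRender]
    simp
  | case3 i off acc h heq ih =>
    simp only [pvCharEqStr, h1] at heq
    have hc : ¬ c1 = s[i] := by simpa using heq
    have hb : (s[i] == c1) = false := by
      simp only [beq_eq_false_iff_ne, ne_eq]
      exact fun hh => hc hh.symm
    conv_rhs => rw [pvBFind]
    rw [dif_pos h]
    simp only [hb, Bool.false_eq_true]
    rw [if_neg not_false]
    exact ih
  | case4 i off acc h =>
    rw [pvBFind, dif_neg h]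
    rw [pvBRender]
    simp

-- ===== VERDICT (by name: the statement is the Claim_ definition above) =====
theorem get_assigned_mods_spec : Claim_equal_get_assigned_mods := by
  intro peptide symbol1 symbol2 numbering _
  unfold Spec_get_assigned_mods get_assigned_mods get_assigned_mods_alt
  cases h1 : symbol1.toList with
  | nil =>
    rw [pvALoop_no_sym1 _ _ _ _ (by simp [h1])]
  | cons c1 tl =>
    cases tl with
    | cons d tl' => rw [pvALoop_no_sym1 _ _ _ _ (by simp [h1])]
    | nil =>
      cases h2 : symbol2.toList with
      | nil => rw [pvALoop_no_sym2 _ _ _ _ (by simp [h2])]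
      | cons c2 tl2 =>
        cases tl2 with
        | cons d2 tl2' => rw [pvALoop_no_sym2 _ _ _ _ (by simp [h2])]
        | nil =>
          rw [pvALoop_eq_render _ _ _ _ c1 c2 h1 h2]
          simp
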